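-- pv_equiv track=rewrite | github.com/roselinepli/CS61A-Fall-2022 | lab/lab3.py | get_k_run_starter
-- ===== SOURCE A (Python) =====
-- def get_k_run_starter(n,k):
--     """Returns the 0th digit of the kth increasing run within n.
--
--     >>> get_k_run_starter(123444345, 1)
--     4
--     >>> get_k_run_starter(123444345, 2)
--     4
--     >>> get_k_run_starter(123444345, 0)
--     3
--     >>> get_k_run_starter(123412341234, 1)
--     1
--     >>> get_k_run_starter(1234234534564567, 0)
--     4
--     >>> get_k_run_starter(1234234534564567, 1)
--     3
--     >>> get_k_run_starter(1234234534564567, 2)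
--     2
--     """
--     i = 0
--     while i <= k:
--         while n > 10 and (n % 10 > (n //10) % 10):
--             n //= 10
--         final = n % 10
--         i += 1
--         n //= 10
--     return final
-- ===== SOURCE B (Python) =====
-- def get_k_run_starter(n, k):
--     # Build the full little-endian digit list once, then take the run starters
--     # (a digit is a run starter iff it is <= the next digit, or is the last digit)
--     # and index the resulting table; out-of-range k yields 0.
--     digits = []
--     while n > 0:
--         digits.append(n % 10)
--         n //= 10
--     starts = [d for d, nxt in zip(digits, digits[1:]) if d <= nxt] + digits[-1:]
--     return starts[k] if 0 <= k < len(starts) else 0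
-- ===== Notes on version B (the rewrite author's own statement) =====
-- stated objective: alternative
-- what changed: A interleaves two nested while-loops that strip and re-scan digits arithmetically k+1 times; B builds the full little-endian digit list once, derives the table of all run starters in one zip/filter pass, and simply indexes it (out-of-range k gives 0).
-- outside the precondition, e.g. on get_k_run_starter(-123, 0): A returns 7, B returns 0; on get_k_run_starter(-1, 2): A returns 9, B returns 0
import Mathlib
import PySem

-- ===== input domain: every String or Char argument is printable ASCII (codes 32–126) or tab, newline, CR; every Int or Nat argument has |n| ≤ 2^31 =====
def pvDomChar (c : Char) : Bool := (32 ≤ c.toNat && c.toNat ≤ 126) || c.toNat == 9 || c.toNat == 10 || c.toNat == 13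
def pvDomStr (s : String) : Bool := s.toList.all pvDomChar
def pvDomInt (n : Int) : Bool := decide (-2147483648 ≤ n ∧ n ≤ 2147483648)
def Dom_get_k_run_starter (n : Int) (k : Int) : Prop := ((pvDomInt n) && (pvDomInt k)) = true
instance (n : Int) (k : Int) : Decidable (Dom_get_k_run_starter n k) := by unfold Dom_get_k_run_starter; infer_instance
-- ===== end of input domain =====

-- B replaces A's interleaved nested while-loops by building the full little-endian
-- digit table once and indexing the list of run starters (objective: alternative).

-- ===== PORT A =====
-- inner while loop: strip digits while n > 10 and n % 10 > (n // 10) % 10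
def stripA (n : Int) : Int :=
  if _h : n > 10 ∧ PySem.Int.mod n 10 > PySem.Int.mod (PySem.Int.floordiv n 10) 10 then
    stripA (PySem.Int.floordiv n 10)
  else n
termination_by n.toNat
decreasing_by
  have h10 : PySem.Int.floordiv n 10 = n / 10 := PySem.Int.floordiv_eq_ediv_of_pos (by omega)
  rw [h10]; omega

-- outer while loop: runs (k+1) times for k ≥ 0; `final` starts as a placeholder 0
-- (Python's unbound `final`, reachable only for k < 0, outside Pre_)
def loopA : Int → Nat → Int → Int
  | _, 0, final => final
  | n, c + 1, _ =>
    let m := stripA n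
    loopA (PySem.Int.floordiv m 10) c (PySem.Int.mod m 10)

def get_k_run_starter (n : Int) (k : Int) : Int := loopA n (k + 1).toNat 0

-- ===== PORT B =====
-- digits = [] ; while n > 0: digits.append(n % 10); n //= 10
def digitsB (n : Int) : List Int :=
  if _h : n > 0 then PySem.Int.mod n 10 :: digitsB (PySem.Int.floordiv n 10) else []
termination_by n.toNat
decreasing_by
  have h10 : PySem.Int.floordiv n 10 = n / 10 := PySem.Int.floordiv_eq_ediv_of_pos (by omega)
  rw [h10]; omega

-- starts = [d for d, nxt in zip(digits, digits[1:]) if d <= nxt] + digits[-1:]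
def startsB (ds : List Int) : List Int :=
  ((ds.zip (PySem.List.slice ds (some 1) none)).filter (fun p => decide (p.1 ≤ p.2))).map Prod.fst
    ++ PySem.List.slice ds (some (-1)) none

def get_k_run_starter_alt (n : Int) (k : Int) : Int :=
  let starts := startsB (digitsB n)
  if 0 ≤ k ∧ k < PySem.List.len starts then starts.getD k.toNat 0 else 0

-- ===== PRECONDITION & SPEC =====
-- Pre_ excludes negative k, on which A raises UnboundLocalError, and negative n,
-- which is outside the natural domain of decimal digit runs (A's values there are
-- artefacts of floor division, e.g. endless 9s); B returns 0 on negative n.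
def Pre_get_k_run_starter (n : Int) (k : Int) : Prop := 0 ≤ n ∧ 0 ≤ k
instance (n : Int) (k : Int) : Decidable (Pre_get_k_run_starter n k) := by unfold Pre_get_k_run_starter; infer_instance
def pvWitness_get_k_run_starter : Int × Int := (123444345, 1)

def Spec_get_k_run_starter (n : Int) (k : Int) (out : Int) : Prop := out = get_k_run_starter_alt n k
instance (n : Int) (k : Int) (out : Int) : Decidable (Spec_get_k_run_starter n k out) := by unfold Spec_get_k_run_starter; infer_instance

-- ===== CLAIM (what is proved, stated in full; the proofs are below) =====
def Claim_equal_get_k_run_starter : Prop := ∀ (n : Int) (k : Int), Dom_get_k_run_starter n k → Pre_get_k_run_starter n k → Spec_get_k_run_starter n k (get_k_run_starter n k)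

-- ===== LEMMAS AND PROOFS =====

theorem startsB_nil : startsB [] = [] := by
  simp [startsB, PySem.List.slice_from_one, PySem.List.slice_from_neg_one]

theorem startsB_single (d : Int) : startsB [d] = [d] := by
  simp [startsB, PySem.List.slice_from_one, PySem.List.slice_from_neg_one]

theorem startsB_cons (d e : Int) (rest : List Int) :
    startsB (d :: e :: rest) = (if d ≤ e then [d] else []) ++ startsB (e :: rest) := by
  simp only [startsB, PySem.List.slice_from_one, PySem.List.slice_from_neg_one]
  simp only [List.tail_cons, List.zip_cons_cons, List.filter_cons, List.length_cons]
  have hdrop : (d :: e :: rest).drop (rest.length + 1 + 1 - 1) = (e :: rest).drop (rest.length + 1 - 1) := by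
    simp
  rw [hdrop]
  by_cases h : d ≤ e <;> simp [h]

theorem digitsB_of_pos (n : Int) (h : n > 0) :
    digitsB n = PySem.Int.mod n 10 :: digitsB (PySem.Int.floordiv n 10) := by
  rw [digitsB]; simp [h]

theorem digitsB_of_nonpos (n : Int) (h : ¬ n > 0) : digitsB n = [] := by
  rw [digitsB]; simp [h]

theorem stripA_pos (n : Int) (h : 0 < n) : 0 < stripA n := by
  rw [stripA]
  split
  · rename_i hc
    have h10 : PySem.Int.floordiv n 10 = n / 10 := PySem.Int.floordiv_eq_ediv_of_pos (by omega)
    have : 0 < PySem.Int.floordiv n 10 := by rw [h10]; omega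
    exact stripA_pos _ this
  · exact h
termination_by n.toNat
decreasing_by
  rename_i _hc _
  have h10 : PySem.Int.floordiv n 10 = n / 10 := PySem.Int.floordiv_eq_ediv_of_pos (by omega)
  rw [h10]; omega

-- core invariant: the run-starter table of the digits of n > 0 is the first recorded
-- `final` followed by the table for the rest of the digits
theorem startsB_digitsB_step (n : Int) (h : 0 < n) :
    startsB (digitsB n) =
      PySem.Int.mod (stripA n) 10 :: startsB (digitsB (PySem.Int.floordiv (stripA n) 10)) := by
  have h10 : PySem.Int.floordiv n 10 = n / 10 := PySem.Int.floordiv_eq_ediv_of_pos (by omega)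
  have hm : PySem.Int.mod n 10 = n % 10 := PySem.Int.mod_eq_emod_of_pos (by omega)
  rw [stripA]
  split
  · rename_i hc
    -- stripping step: n > 10, last digit > next digit
    have hq : 0 < PySem.Int.floordiv n 10 := by rw [h10]; omega
    have hq10 : PySem.Int.floordiv (PySem.Int.floordiv n 10) 10 = (n / 10) / 10 :=
      by rw [h10]; exact PySem.Int.floordiv_eq_ediv_of_pos (by omega)
    have hqm : PySem.Int.mod (PySem.Int.floordiv n 10) 10 = (n / 10) % 10 :=
      by rw [h10]; exact PySem.Int.mod_eq_emod_of_pos (by omega)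
    rw [digitsB_of_pos n h, digitsB_of_pos _ hq, startsB_cons,
        if_neg (by omega), List.nil_append, ← digitsB_of_pos _ hq]
    exact startsB_digitsB_step _ hq
  · rename_i hc
    -- no strip: record n % 10
    rw [digitsB_of_pos n h]
    by_cases hq : 0 < PySem.Int.floordiv n 10
    · have hqm : PySem.Int.mod (PySem.Int.floordiv n 10) 10 = (n / 10) % 10 :=
        by rw [h10]; exact PySem.Int.mod_eq_emod_of_pos (by omega)
      rw [digitsB_of_pos _ hq, startsB_cons, if_pos (by rw [hm, hqm]; rw [h10] at hq; omega),
          ← digitsB_of_pos _ hq]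
      simp
    · rw [digitsB_of_nonpos _ hq, startsB_single, startsB_nil]
termination_by n.toNat
decreasing_by
  rename_i hc
  rw [PySem.Int.floordiv_eq_ediv_of_pos (by omega : (0:Int) < 10)]; omega

theorem stripA_zero : stripA 0 = 0 := by
  rw [stripA]; norm_num

theorem loopA_zero (c : Nat) : ∀ f : Int, loopA 0 (c + 1) f = 0 := by
  induction c with
  | zero =>
    intro f
    show loopA (PySem.Int.floordiv (stripA 0) 10) 0 (PySem.Int.mod (stripA 0) 10) = 0
    rw [stripA_zero]; decide
  | succ c ih =>
    intro f
    show loopA (PySem.Int.floordiv (stripA 0) 10) (c + 1) (PySem.Int.mod (stripA 0) 10) = 0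
    rw [stripA_zero, (by decide : PySem.Int.floordiv 0 10 = (0:Int))]
    exact ih _

-- A's outer loop, run c+1 times from a nonnegative n, reads off entry c of B's table
theorem loopA_eq_getD (c : Nat) : ∀ (n f : Int), 0 ≤ n →
    loopA n (c + 1) f = (startsB (digitsB n)).getD c 0 := by
  induction c with
  | zero =>
    intro n f hn
    rcases lt_or_eq_of_le hn with h | h
    · rw [startsB_digitsB_step n h]
      rfl
    · rw [← h, digitsB_of_nonpos 0 (by omega), startsB_nil, loopA_zero _ _]
      rfl
  | succ c ih =>
    intro n f hn
    rcases lt_or_eq_of_le hn with h | h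
    · have hs : 0 < stripA n := stripA_pos n h
      have hfd : 0 ≤ PySem.Int.floordiv (stripA n) 10 := by
        rw [PySem.Int.floordiv_eq_ediv_of_pos (by omega : (0:Int) < 10)]; omega
      rw [startsB_digitsB_step n h]
      show loopA (PySem.Int.floordiv (stripA n) 10) (c + 1) (PySem.Int.mod (stripA n) 10) = _
      rw [ih _ _ hfd]
      rfl
    · rw [← h, digitsB_of_nonpos 0 (by omega), startsB_nil, loopA_zero _ _]
      rfl

-- B's guarded indexing is getD for k ≥ 0
theorem alt_eq_getD (n k : Int) (hk : 0 ≤ k) :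
    get_k_run_starter_alt n k = (startsB (digitsB n)).getD k.toNat 0 := by
  unfold get_k_run_starter_alt
  simp only [PySem.List.len_eq]
  split
  · rfl
  · rename_i hcond
    have hlt : ¬ k < ((startsB (digitsB n)).length : Int) := fun hl => hcond ⟨hk, hl⟩
    rw [List.getD_eq_default _ _ (by omega)]

-- ===== VERDICT (by name: the statement is the Claim_ definition above) =====
theorem get_k_run_starter_spec : Claim_equal_get_k_run_starter := by
  intro n k _ hpre
  obtain ⟨hn, hk⟩ := hpre
  show get_k_run_starter n k = get_k_run_starter_alt n k
  unfold get_k_run_starter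
  have h1 : (k + 1).toNat = k.toNat + 1 := by omega
  rw [h1, loopA_eq_getD k.toNat n 0 hn, alt_eq_getD n k hk]
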